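-- pv_equiv track=rewrite | github.com/pokes2013/git_code-learn | python/03.python操作Excel/openpyxl项目实战-考勤计算/demo004-清理重复打卡记录.py | clean_attendance_records
-- ===== SOURCE A (Python) =====
-- def clean_attendance_records(times):
--     """
--     清理考勤打卡记录，移除时间间隔最小的重复打卡记录
--
--     参数:
--     times: 时间字符串列表，格式为 ['HH:MM', ...]
--
--     返回:
--     清理后的时间列表
--     """
--     if len(times) <= 1:
--         return times
--
--     # 将时间字符串转换为分钟数，方便计算
--     def time_to_minutes(time_str):
--         hours, minutes = map(int, time_str.split(':'))
--         return hours * 60 + minutes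
--
--     # 将分钟数转换回时间字符串
--     def minutes_to_time(minutes):
--         hours = minutes // 60
--         minutes = minutes % 60
--         return f"{hours:02d}:{minutes:02d}"
--
--     # 转换为分钟数列表
--     minutes_list = [time_to_minutes(t) for t in times]
--
--     # 找出所有需要删除的索引
--     to_remove = set()
--
--     # 遍历所有相邻的时间对，找出间隔最小的重复记录
--     for i in range(len(minutes_list) - 1):
--         current_time = minutes_list[i]
--         next_time = minutes_list[i + 1]
--         time_diff = next_time - current_time
--
--         # 如果时间间隔很小（比如小于5分钟），认为是重复打卡
--         if time_diff < 5:  # 可以根据实际情况调整这个阈值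
--             # 找出应该删除哪一个（通常是保留第一个，删除第二个）
--             # 但为了更智能，我们可以根据业务逻辑决定
--             to_remove.add(i + 1)  # 默认删除第二个
--
--     # 构建清理后的结果
--     result = []
--     for i, time_str in enumerate(times):
--         if i not in to_remove:
--             result.append(time_str)
--
--     return result
-- ===== SOURCE B (Python) =====
-- def clean_attendance_records(times):
--     """
--     清理考勤打卡记录：把打卡序列切分成“连击段”（每次打卡距其前一次原始
--     打卡不足5分钟的极大连续段），然后每段只保留第一次打卡。
--     """
--     if len(times) <= 1:
--         return times
--
--     def time_to_minutes(time_str):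
--         hours, minutes = map(int, time_str.split(':'))
--         return hours * 60 + minutes
--
--     # stage 1: partition into maximal bursts of punches < 5 minutes apart
--     groups = [[times[0]]]
--     for t in times[1:]:
--         if time_to_minutes(t) - time_to_minutes(groups[-1][-1]) < 5:
--             groups[-1].append(t)
--         else:
--             groups.append([t])
--
--     # stage 2: each burst collapses to its first punch
--     return [g[0] for g in groups]
-- ===== Notes on version B (the rewrite author's own statement) =====
-- stated objective: alternative
-- what changed: Replaces A's 'build a remove-set of indices over range(n-1), then enumerate-and-filter by index' with a burst-grouping algorithm: partition the punches into maximal consecutive groups in which each punch is <5 minutes after its original predecessor (the last element of the current group), then project out each group's first punch.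
import Mathlib
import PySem

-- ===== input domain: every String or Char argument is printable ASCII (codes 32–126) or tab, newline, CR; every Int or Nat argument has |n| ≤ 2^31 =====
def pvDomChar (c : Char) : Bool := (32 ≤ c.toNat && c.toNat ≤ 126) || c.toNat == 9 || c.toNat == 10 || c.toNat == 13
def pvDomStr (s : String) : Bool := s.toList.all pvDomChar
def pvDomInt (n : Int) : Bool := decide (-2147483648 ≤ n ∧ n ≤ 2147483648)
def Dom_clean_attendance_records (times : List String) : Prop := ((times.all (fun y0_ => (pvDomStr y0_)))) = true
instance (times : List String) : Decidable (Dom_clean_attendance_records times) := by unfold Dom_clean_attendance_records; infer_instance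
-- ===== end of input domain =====

-- B replaces A's "remove-index-set then index filter" with burst grouping (partition into
-- maximal runs of punches < 5 minutes apart, keep each group's first punch); alternative
-- decomposition, same O(n) cost (return value only).


-- ===== PORT A =====
-- time_to_minutes, total form: outside Pre_ (unparsable string) Python raises ValueError;
-- there the getD-defaults are never relied upon.
def pvTimeToMinutes (t : String) : Int :=
  match (PySem.Str.split? t ":").getD [] with
  | [h, m] => (PySem.Int.ofStr? h).getD 0 * 60 + (PySem.Int.ofStr? m).getD 0
  | _ => 0

def clean_attendance_records (times : List String) : List String :=
  if times.length ≤ 1 then times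
  else
    let minutes_list := times.map pvTimeToMinutes
    let to_remove : PySem.Set Int :=
      (PySem.List.pyRange 0 ((minutes_list.length : Int) - 1) 1).foldl
        (fun s i =>
          let current_time := PySem.List.pyGetD minutes_list i 0
          let next_time := PySem.List.pyGetD minutes_list (i + 1) 0
          if next_time - current_time < 5 then s.add (i + 1) else s)
        PySem.Set.empty
    (PySem.List.enumerate times).foldl
      (fun result p => if ¬ p.1 ∈ to_remove then result ++ [p.2] else result) []

-- ===== PORT B =====
-- `groups[-1].append(t)` mutates the last group in place: ported as replacing the last
-- group (dropLast ++ [last ++ [t]]), which is the value this mutation leaves in `groups`.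
def clean_attendance_records_alt (times : List String) : List String :=
  if times.length ≤ 1 then times
  else
    let groups : List (List String) :=
      (PySem.List.slice times (some 1) none).foldl
        (fun groups t =>
          if pvTimeToMinutes t -
              pvTimeToMinutes (PySem.List.pyGetD (PySem.List.pyGetD groups (-1) []) (-1) "") < 5
          then groups.dropLast ++ [PySem.List.pyGetD groups (-1) [] ++ [t]]
          else groups ++ [[t]])
        [[PySem.List.pyGetD times 0 ""]]
    groups.map (fun g => PySem.List.pyGetD g 0 "")

-- ===== PRECONDITION & SPEC =====
-- whether Python's `hours, minutes = map(int, time_str.split(':'))` succeeds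
def pvParses (t : String) : Bool :=
  match (PySem.Str.split? t ":").getD [] with
  | [h, m] => (PySem.Int.ofStr? h).isSome && (PySem.Int.ofStr? m).isSome
  | _ => false

-- Pre_ excludes exactly the inputs where Python A raises ValueError: a list of length ≥ 2
-- containing a string that does not split on ':' into exactly two int()-parsable parts.
def Pre_clean_attendance_records (times : List String) : Prop :=
  times.length ≤ 1 ∨ ∀ t ∈ times, pvParses t = true
instance (times : List String) : Decidable (Pre_clean_attendance_records times) := by
  unfold Pre_clean_attendance_records; infer_instance

def pvWitness_clean_attendance_records : List String := ["08:00", "08:03", "12:00"]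

def Spec_clean_attendance_records (times : List String) (out : List String) : Prop := out = clean_attendance_records_alt times
instance (times : List String) (out : List String) : Decidable (Spec_clean_attendance_records times out) := by unfold Spec_clean_attendance_records; infer_instance

-- ===== CLAIM (what is proved, stated in full; the proofs are below) =====
def Claim_equal_clean_attendance_records : Prop := ∀ (times : List String), Dom_clean_attendance_records times → Pre_clean_attendance_records times → Spec_clean_attendance_records times (clean_attendance_records times)

-- ===== LEMMAS AND PROOFS =====

-- 'for x in l: if c(x): s.add(g(x))' builds a set whose members are the old ones plus the images
theorem pv_mem_foldl_set_add (c : Int → Prop) [DecidablePred c] (g : Int → Int) :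
    ∀ (l : List Int) (s : PySem.Set Int) (j : Int),
      (j ∈ l.foldl (fun s i => if c i then s.add (g i) else s) s) ↔
        j ∈ s ∨ ∃ i ∈ l, c i ∧ j = g i := by
  intro l
  induction l with
  | nil => simp
  | cons a l ih =>
    intro s j
    simp only [List.foldl_cons]
    by_cases hc : c a
    · simp only [if_pos hc, ih, PySem.Set.mem_add]
      constructor
      · rintro ((h | h) | ⟨i, hi, hci, hj⟩)
        · exact Or.inl h
        · exact Or.inr ⟨a, by simp, hc, h⟩
        · exact Or.inr ⟨i, by simp [hi], hci, hj⟩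
      · rintro (h | ⟨i, hi, hci, hj⟩)
        · exact Or.inl (Or.inl h)
        · rcases List.mem_cons.mp hi with rfl | hi
          · exact Or.inl (Or.inr hj)
          · exact Or.inr ⟨i, hi, hci, hj⟩
    · simp only [if_neg hc, ih]
      constructor
      · rintro (h | ⟨i, hi, hci, hj⟩)
        · exact Or.inl h
        · exact Or.inr ⟨i, by simp [hi], hci, hj⟩
      · rintro (h | ⟨i, hi, hci, hj⟩)
        · exact Or.inl h
        · rcases List.mem_cons.mp hi with rfl | hi
          · exact absurd hci hc
          · exact Or.inr ⟨i, hi, hci, hj⟩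

-- 'for x in l: if p(x): out.append(f(x))' is append-filter-map (Prop test)
theorem pv_foldl_append_ite {α β : Type} (p : α → Prop) [DecidablePred p] (f : α → β) :
    ∀ (l : List α) (acc : List β),
      l.foldl (fun acc x => if p x then acc ++ [f x] else acc) acc
        = acc ++ (l.filter (fun x => decide (p x))).map f := by
  intro l
  induction l with
  | nil => simp
  | cons a l ih =>
    intro acc
    by_cases h : p a <;> simp [h, ih]

theorem pv_getD_map_tm (ts : List String) (k : Nat) (hk : k < ts.length) :
    (ts.map pvTimeToMinutes).getD k 0 = pvTimeToMinutes (ts.getD k "") := by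
  rw [List.getD_eq_getElem?_getD, List.getD_eq_getElem?_getD, List.getElem?_map,
      List.getElem?_eq_getElem hk]
  simp

-- the central induction: A's index filter over the tail = B's adjacent-pair filter over the tail
theorem pv_key (ts : List String) (R : List Int)
    (h1 : ∀ k : Nat, k + 1 < ts.length →
      ((((k : Int) + 1) ∈ R) ↔
        pvTimeToMinutes (ts.getD (k+1) "") - pvTimeToMinutes (ts.getD k "") < 5)) :
    ∀ (tl : List String) (k : Nat), ts.drop k = ts.getD k "" :: tl →
      ((PySem.List.enumerate tl ((k : Int) + 1)).filter
          (fun p => decide (¬ p.1 ∈ R))).map (fun p => p.2)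
        = (((ts.getD k "" :: tl).zip tl).filter
            (fun pc => decide (pvTimeToMinutes pc.2 - pvTimeToMinutes pc.1 ≥ 5))).map
            (fun pc => pc.2) := by
  intro tl
  induction tl with
  | nil => intro k _; simp [PySem.List.enumerate]
  | cons c tl' ih =>
    intro k hdrop
    have hlen : k + 1 < ts.length := by
      have := congrArg List.length hdrop
      simp [List.length_drop] at this
      omega
    have hdrop' : ts.drop (k + 1) = c :: tl' := by
      rw [← List.tail_drop, hdrop]; rfl
    have hgd : ts.getD (k+1) "" = c := by
      have h0 : ts[(k+1)]? = some c := by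
        have := (List.getElem?_drop (xs := ts) (i := k+1) (j := 0))
        rw [hdrop'] at this
        simpa using this.symm
      simp [List.getD_eq_getElem?_getD, h0]
    have hcond := h1 k hlen
    rw [hgd] at hcond
    have ihk := ih (k + 1) (by rw [hdrop', hgd])
    rw [hgd] at ihk
    have hcast : ((k : Int) + 1) + 1 = (((k + 1 : Nat)) : Int) + 1 := by push_cast; ring
    simp only [PySem.List.enumerate_cons, List.zip_cons_cons, List.filter_cons]
    split_ifs with hA hB hB
    · -- kept on both sides
      simp only [List.map_cons]
      congr 1
    · -- A keeps, B drops: contradiction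
      exfalso
      simp only [decide_eq_true_eq] at hA hB
      exact hA (hcond.mpr (by omega))
    · -- A drops, B keeps: contradiction
      exfalso
      simp only [decide_eq_true_eq] at hA hB
      have := hcond.mp (by by_contra hmem; exact hA hmem)
      omega
    · -- dropped on both sides
      rw [hcast]
      exact ihk

-- B's grouping invariant: the accumulator always has the shape gs ++ [g ++ [a]] where a is
-- the previous (original) punch; the heads of the final groups are the heads so far plus
-- exactly the tail punches ≥ 5 minutes after their original predecessor.
theorem pv_groups :
    ∀ (l : List String) (gs : List (List String)) (g : List String) (a : String),
      ((l.foldl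
          (fun groups t =>
            if pvTimeToMinutes t -
                pvTimeToMinutes (PySem.List.pyGetD (PySem.List.pyGetD groups (-1) []) (-1) "") < 5
            then groups.dropLast ++ [PySem.List.pyGetD groups (-1) [] ++ [t]]
            else groups ++ [[t]])
          (gs ++ [g ++ [a]])).map (fun g => PySem.List.pyGetD g 0 ""))
        = (gs ++ [g ++ [a]]).map (fun g => PySem.List.pyGetD g 0 "")
            ++ (((a :: l).zip l).filter
                (fun pc => decide (pvTimeToMinutes pc.2 - pvTimeToMinutes pc.1 ≥ 5))).map
                (fun pc => pc.2) := by
  intro l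
  induction l with
  | nil => simp
  | cons t l' ih =>
    intro gs g a
    simp only [List.foldl_cons, PySem.List.pyGetD_neg_one_append_singleton,
      List.dropLast_concat, List.zip_cons_cons, List.filter_cons]
    by_cases hc : pvTimeToMinutes t - pvTimeToMinutes a < 5
    · rw [if_pos hc, if_neg (by simp; omega)]
      have := ih gs (g ++ [a]) t
      rw [List.append_assoc (g) [a] [t]] at *
      rw [this]
      congr 1
      simp only [List.map_append, List.map_cons]
      congr 2
      cases g <;> simp [PySem.List.pyGetD_zero]
    · rw [if_neg hc, if_pos (by simp; omega)]
      have := ih (gs ++ [g ++ [a]]) [] t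
      simp only [List.nil_append] at this
      rw [this]
      simp [PySem.List.pyGetD_zero]

-- ===== VERDICT (by name: the statement is the Claim_ definition above) =====
theorem clean_attendance_records_spec : Claim_equal_clean_attendance_records := by
  intro times _ _
  unfold Spec_clean_attendance_records clean_attendance_records clean_attendance_records_alt
  by_cases hlen : times.length ≤ 1
  · simp [hlen]
  · rcases times with _ | ⟨t0, rest⟩
    · simp at hlen
    · simp only [if_neg hlen]
      rw [PySem.List.slice_from_one]
      simp only [List.tail_cons, PySem.List.pyGetD_zero_cons]
      -- B side: burst grouping = head ++ adjacent-pair filter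
      have hB := pv_groups rest [] [] t0
      simp only [List.nil_append] at hB
      rw [hB, show (List.map (fun g => PySem.List.pyGetD g 0 "") [[t0]]) = [t0] from by
        simp [PySem.List.pyGetD_zero]]
      -- A side
      have hmemR : ∀ j : Int,
          (j ∈ (PySem.List.pyRange 0 ((((t0 :: rest).map pvTimeToMinutes).length : Int) - 1) 1).foldl
            (fun s i =>
              let current_time := PySem.List.pyGetD ((t0 :: rest).map pvTimeToMinutes) i 0
              let next_time := PySem.List.pyGetD ((t0 :: rest).map pvTimeToMinutes) (i + 1) 0
              if next_time - current_time < 5 then s.add (i + 1) else s)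
            PySem.Set.empty) ↔
          ∃ i ∈ PySem.List.pyRange 0 (((t0 :: rest).length : Int) - 1) 1,
            (PySem.List.pyGetD ((t0 :: rest).map pvTimeToMinutes) (i + 1) 0
              - PySem.List.pyGetD ((t0 :: rest).map pvTimeToMinutes) i 0 < 5) ∧ j = i + 1 := by
        intro j
        have := pv_mem_foldl_set_add
          (fun i => PySem.List.pyGetD ((t0 :: rest).map pvTimeToMinutes) (i + 1) 0
              - PySem.List.pyGetD ((t0 :: rest).map pvTimeToMinutes) i 0 < 5)
          (fun i => i + 1)
          (PySem.List.pyRange 0 ((((t0 :: rest).map pvTimeToMinutes).length : Int) - 1) 1)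
          PySem.Set.empty j
        simp only [List.length_map] at this ⊢
        rw [this]
        simp [PySem.Set.empty]
      set R : PySem.Set Int :=
        (PySem.List.pyRange 0 ((((t0 :: rest).map pvTimeToMinutes).length : Int) - 1) 1).foldl
          (fun s i =>
            let current_time := PySem.List.pyGetD ((t0 :: rest).map pvTimeToMinutes) i 0
            let next_time := PySem.List.pyGetD ((t0 :: rest).map pvTimeToMinutes) (i + 1) 0
            if next_time - current_time < 5 then s.add (i + 1) else s)
          PySem.Set.empty with hRdef
      have h1 : ∀ k : Nat, k + 1 < (t0 :: rest).length →
          ((((k : Int) + 1) ∈ R) ↔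
            pvTimeToMinutes ((t0 :: rest).getD (k+1) "") -
              pvTimeToMinutes ((t0 :: rest).getD k "") < 5) := by
        intro k hk
        rw [hmemR]
        constructor
        · rintro ⟨i, hi, hc, hji⟩
          rw [PySem.List.mem_pyRange_one] at hi
          have hik : i = (k : Int) := by omega
          subst hik
          rw [show ((k : Int) + 1) = ((k + 1 : Nat) : Int) by push_cast; ring,
              PySem.List.pyGetD_natCast, pv_getD_map_tm _ (k+1) hk,
              PySem.List.pyGetD_natCast, pv_getD_map_tm _ k (by omega)] at hc
          exact hc
        · intro hc
          refine ⟨(k : Int), ?_, ?_, rfl⟩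
          · rw [PySem.List.mem_pyRange_one]
            refine ⟨by positivity, by omega⟩
          · rw [show ((k : Int) + 1) = ((k + 1 : Nat) : Int) by push_cast; ring,
                PySem.List.pyGetD_natCast, pv_getD_map_tm _ (k+1) hk,
                PySem.List.pyGetD_natCast, pv_getD_map_tm _ k (by omega)]
            exact hc
      rw [pv_foldl_append_ite (fun p : Int × String => ¬ p.1 ∈ R) (fun p => p.2)]
      have h0notR : ¬ (0 : Int) ∈ R := by
        rw [hmemR]
        rintro ⟨i, hi, _, hji⟩
        rw [PySem.List.mem_pyRange_one] at hi
        omega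
      have hkey := pv_key (t0 :: rest) R h1 rest 0 (by simp)
      simp only [List.getD_cons_zero] at hkey
      rw [show PySem.List.enumerate (t0 :: rest) 0
            = (0, t0) :: PySem.List.enumerate rest (0 + 1) from PySem.List.enumerate_cons t0 rest 0]
      simp only [List.filter_cons]
      rw [if_pos (by simpa using h0notR)]
      simp only [List.map_cons, List.nil_append, List.singleton_append]
      congr 1
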